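-- pv_equiv track=rewrite | github.com/10xRyan/nlp_hmm_memm | data_exploration.py | stringify_labeled_doc
-- ===== SOURCE A (Python) =====
-- def stringify_labeled_doc(text, ner):
--     """
--     Returns a string representation of a tagged sentence from the dataset.
--
--     Input:
--       text: List[String], A document represented as a list of tokens, where each
--       token is a string
--       ner: List[String], A list of NER tags, where each tag corresponds to the
--       token at the same index in `text`
--     Output:
--       result: String, representing the example in a readable format. Named entites
--       are combined with their corresponding tokens, and surrounded by square
--       brackets. Sequential named entity tags that are part of the same named
--       entity should be combined into a single named entity. The format for named
--       entities should be [TAG token1 token2 ... tokenN] where TAG is the tag for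
--       the named entity, and token1 ... tokenN are the tokens that make up the
--       named entity. Note that tokens which are part of the same named entity
--       should be separated by a single space. BIO prefix are stripped from the
--       tags. O tags are ignored.
--
--
--       E.g.
--       ["Gavin", "Fogel", "is", "cool", "."]
--       ["B-PER", "I-PER", "O", "O", "."]
--
--       returns "[PER Gavin Fogel] is cool."
--     """
--     # TODO: YOUR CODE HERE
--
--     prev_ner = 'O'
--     result = ''
--     for i in range(len(text)):
--       if ner[i] == 'O':
--         if prev_ner != 'O':
--           result += '] '
--           result += text[i]
--         else:
--           result += ' ' + text[i]
--         prev_ner = 'O'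
--       # If {something}-{ORG, PER, LOC, MISC}
--       elif ner[i].split('-')[1] in { 'ORG', 'PER', 'LOC', 'MISC'}:
--         if prev_ner == 'O':
--           result += ' [' + ner[i].split('-')[1] + ' '
--           result += text[i]
--         elif prev_ner == ner[i].split('-')[1]:
--           result += ' ' + text[i]
--         else:
--           result += '] [' + ner[i].split('-')[1] + ' '
--           result += text[i]
--         prev_ner = ner[i].split('-')[1]
--
--     if prev_ner != 'O':
--       result += ']'
--
--     return result.strip()
-- ===== SOURCE B (Python) =====
-- def stringify_labeled_doc(text, ner):
--     # First pass: build segments — plain words and entity groups.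
--     segs = []           # each item: a plain token (str) or an entity (cat, [tokens])
--     cur = None          # open entity group, or None
--     for tok, tag in zip(text, ner):
--         if tag == 'O':
--             if cur is not None:
--                 segs.append(cur)
--                 cur = None
--             segs.append(tok)
--         else:
--             cat = tag.split('-')[1]
--             if cat in {'ORG', 'PER', 'LOC', 'MISC'}:
--                 if cur is not None and cur[0] == cat:
--                     cur = (cat, cur[1] + [tok])
--                 else:
--                     if cur is not None:
--                         segs.append(cur)
--                     cur = (cat, [tok])
--     if cur is not None:
--         segs.append(cur)
--     # Second pass: render and join.
--     pieces = [s if isinstance(s, str) else '[' + s[0] + ' ' + ' '.join(s[1]) + ']'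
--               for s in segs]
--     return ' '.join(pieces).strip()
-- ===== Notes on version B (the rewrite author's own statement) =====
-- stated objective: alternative
-- what changed: A builds the output string incrementally with a prev-tag state machine and a final strip; B first builds a list of segments (plain words and entity groups of collected tokens), then renders each segment and joins the pieces with spaces.
import Mathlib
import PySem

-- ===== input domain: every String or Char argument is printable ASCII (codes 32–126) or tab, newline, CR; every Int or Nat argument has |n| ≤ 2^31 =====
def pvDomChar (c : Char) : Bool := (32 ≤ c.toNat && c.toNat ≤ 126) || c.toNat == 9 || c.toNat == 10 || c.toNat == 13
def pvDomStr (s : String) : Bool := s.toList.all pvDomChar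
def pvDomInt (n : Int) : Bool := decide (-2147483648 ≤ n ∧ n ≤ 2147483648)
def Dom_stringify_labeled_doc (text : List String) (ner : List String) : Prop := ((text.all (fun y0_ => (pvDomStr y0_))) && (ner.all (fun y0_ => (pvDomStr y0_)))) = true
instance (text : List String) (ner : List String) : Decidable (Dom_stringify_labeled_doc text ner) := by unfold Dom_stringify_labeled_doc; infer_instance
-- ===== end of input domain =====

-- B replaces A's incremental string building (prev-tag state machine with strip at the end) by a
-- two-pass decomposition: first build a list of segments (plain words / entity groups), then render
-- and join them; objective: alternative structure, same cost.


-- ===== PORT A =====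
-- the category set literal { 'ORG', 'PER', 'LOC', 'MISC' } (both Pythons use it verbatim)
def pvCats : PySem.Set String := PySem.Set.ofList ["ORG", "PER", "LOC", "MISC"]

-- tag.split('-')[1]  (both Pythons compute exactly this; the IndexError case is outside Pre_)
def pvTagCat (tag : String) : String :=
  (PySem.List.pyGet? ((PySem.Str.split? tag "-").getD []) 1).getD ""

-- one iteration of A's loop body; state = (prev_ner, result as chars)
def pvStepA (text ner : List String) (st : String × List Char) (i : Int) : String × List Char :=
  let tag := (PySem.List.pyGet? ner i).getD ""
  let tok := ((PySem.List.pyGet? text i).getD "").toList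
  if tag = "O" then
    if st.1 ≠ "O" then ("O", st.2 ++ (']' :: ' ' :: tok))
    else ("O", st.2 ++ (' ' :: tok))
  else if pvCats.contains (pvTagCat tag) then
    if st.1 = "O" then (pvTagCat tag, st.2 ++ (' ' :: '[' :: (pvTagCat tag).toList ++ ' ' :: tok))
    else if st.1 = pvTagCat tag then (pvTagCat tag, st.2 ++ (' ' :: tok))
    else (pvTagCat tag, st.2 ++ (']' :: ' ' :: '[' :: (pvTagCat tag).toList ++ ' ' :: tok))
  else st

def stringify_labeled_doc (text : List String) (ner : List String) : String :=
  let st := (PySem.List.pyRange 0 (PySem.List.len text) 1).foldl (pvStepA text ner) ("O", [])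
  String.ofList (PySem.Chars.strip (if st.1 ≠ "O" then st.2 ++ [']'] else st.2))

-- ===== PORT B =====
-- a segment: a plain word, or an entity group (category, tokens)
-- B state = (finished segments, open entity group or none)

def pvFlush (segs : List (String ⊕ String × List String))
    (cur : Option (String × List String)) : List (String ⊕ String × List String) :=
  match cur with
  | some c => segs ++ [Sum.inr c]
  | none => segs

-- one iteration of B's loop body over a (token, tag) pair
def pvStepB (st : List (String ⊕ String × List String) × Option (String × List String))
    (p : String × String) :
    List (String ⊕ String × List String) × Option (String × List String) :=
  if p.2 = "O" then
    (pvFlush st.1 st.2 ++ [Sum.inl p.1], none)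
  else
    let cat := pvTagCat p.2
    if pvCats.contains cat then
      match st.2 with
      | some c =>
        if c.1 = cat then (st.1, some (cat, c.2 ++ [p.1]))
        else (st.1 ++ [Sum.inr c], some (cat, [p.1]))
      | none => (st.1, some (cat, [p.1]))
    else st

-- second pass: render one segment ('[' + cat + ' ' + ' '.join(toks) + ']' for entities)
def pvRenderSeg : String ⊕ String × List String → List Char
  | Sum.inl w => w.toList
  | Sum.inr (c, ts) => '[' :: c.toList ++ ' ' :: PySem.Chars.join [' '] (ts.map String.toList) ++ [']']

def stringify_labeled_doc_alt (text : List String) (ner : List String) : String :=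
  let st := (text.zip ner).foldl pvStepB ([], none)
  let pieces := (pvFlush st.1 st.2).map pvRenderSeg
  String.ofList (PySem.Chars.strip (PySem.Chars.join [' '] pieces))

-- ===== PRECONDITION & SPEC =====
-- Pre_ excludes exactly the inputs where the Python A raises IndexError: a ner list shorter than
-- text, or a consulted non-'O' tag with no '-' (so tag.split('-')[1] fails).
def Pre_stringify_labeled_doc (text : List String) (ner : List String) : Prop :=
  text.length ≤ ner.length ∧
    ∀ tag ∈ ner.take text.length, tag = "O" ∨ tag.toList.contains '-' = true
instance (text : List String) (ner : List String) : Decidable (Pre_stringify_labeled_doc text ner) := by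
  unfold Pre_stringify_labeled_doc; infer_instance

def pvWitness_stringify_labeled_doc : List String × List String :=
  (["Gavin", "Fogel", "is", "cool", "."], ["B-PER", "I-PER", "O", "O", "O"])

def Spec_stringify_labeled_doc (text : List String) (ner : List String) (out : String) : Prop := out = stringify_labeled_doc_alt text ner
instance (text : List String) (ner : List String) (out : String) : Decidable (Spec_stringify_labeled_doc text ner out) := by unfold Spec_stringify_labeled_doc; infer_instance

-- ===== CLAIM (what is proved, stated in full; the proofs are below) =====
def Claim_equal_stringify_labeled_doc : Prop := ∀ (text : List String) (ner : List String), Dom_stringify_labeled_doc text ner → Pre_stringify_labeled_doc text ner → Spec_stringify_labeled_doc text ner (stringify_labeled_doc text ner)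

-- ===== LEMMAS AND PROOFS =====

-- A's loop body read as a function of the (token, tag) pair
def pvStepPair (st : String × List Char) (p : String × String) : String × List Char :=
  if p.2 = "O" then
    if st.1 ≠ "O" then ("O", st.2 ++ (']' :: ' ' :: p.1.toList))
    else ("O", st.2 ++ (' ' :: p.1.toList))
  else if pvCats.contains (pvTagCat p.2) then
    if st.1 = "O" then (pvTagCat p.2, st.2 ++ (' ' :: '[' :: (pvTagCat p.2).toList ++ ' ' :: p.1.toList))
    else if st.1 = pvTagCat p.2 then (pvTagCat p.2, st.2 ++ (' ' :: p.1.toList))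
    else (pvTagCat p.2, st.2 ++ (']' :: ' ' :: '[' :: (pvTagCat p.2).toList ++ ' ' :: p.1.toList))
  else st

lemma pvStepA_zero (x y : String) (t r : List String) (st : String × List Char) :
    pvStepA (x :: t) (y :: r) st 0 = pvStepPair st (x, y) := by
  simp [pvStepA, pvStepPair]

lemma pvStepA_succ (x y : String) (t r : List String) (st : String × List Char) (k : Nat) :
    pvStepA (x :: t) (y :: r) st ((k : Int) + 1) = pvStepA t r st (k : Int) := by
  have h1 : ((k : Int) + 1) = ((k + 1 : Nat) : Int) := by push_cast; ring
  have e1 : PySem.List.pyGet? (x :: t) ((k : Int) + 1) = PySem.List.pyGet? t (k : Int) := by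
    rw [h1, PySem.List.pyGet?_natCast, PySem.List.pyGet?_natCast]
    simp
  have e2 : PySem.List.pyGet? (y :: r) ((k : Int) + 1) = PySem.List.pyGet? r (k : Int) := by
    rw [h1, PySem.List.pyGet?_natCast, PySem.List.pyGet?_natCast]
    simp
  simp only [pvStepA]
  rw [e1, e2]

lemma pvFoldA_eq_zip (text : List String) : ∀ (ner : List String) (st : String × List Char),
    text.length ≤ ner.length →
    (PySem.List.pyRange 0 (PySem.List.len text) 1).foldl (pvStepA text ner) st
      = (text.zip ner).foldl pvStepPair st := by
  induction text with
  | nil =>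
    intro ner st _
    rw [show PySem.List.len ([] : List String) = 0 from rfl, PySem.List.pyRange_one_eq_nil le_rfl]
    simp
  | cons x t ih =>
    intro ner st h
    match ner with
    | [] => simp at h
    | y :: r =>
      have hlen : (0 : Int) < PySem.List.len (x :: t) := by
        have : PySem.List.len (x :: t) = ((x :: t).length : Int) := PySem.List.len_eq _
        rw [this]; simp
      rw [PySem.List.pyRange_one_cons hlen]
      simp only [List.foldl_cons, List.zip_cons_cons]
      rw [pvStepA_zero]
      have h' : t.length ≤ r.length := by simpa using h
      rw [← ih r (pvStepPair st (x, y)) h']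
      rw [PySem.List.pyRange_one, PySem.List.pyRange_one]
      have e1 : (PySem.List.len (x :: t) - (0 + 1)).toNat = t.length := by
        rw [PySem.List.len_eq]; simp
      have e2 : (PySem.List.len t - 0).toNat = t.length := by
        rw [PySem.List.len_eq]; simp
      rw [e1, e2, List.foldl_map, List.foldl_map]
      apply PySem.List.foldl_congr_mem
      intro s k _
      rw [show (0 : Int) + 1 + (k : Int) = (k : Int) + 1 by ring, show (0 : Int) + (k : Int) = (k : Int) by ring]
      exact pvStepA_succ x y t r s k

-- rendering helpers for the invariant
def pvPieceA (s : String ⊕ String × List String) : List Char := ' ' :: pvRenderSeg s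

def pvOpen : Option (String × List String) → List Char
  | none => []
  | some (c, ts) => ' ' :: '[' :: c.toList ++ ' ' :: PySem.Chars.join [' '] (ts.map String.toList)

def pvFlat (segs : List (String ⊕ String × List String))
    (cur : Option (String × List String)) : List Char :=
  (segs.map pvPieceA).flatten ++ pvOpen cur

def pvTagOf : Option (String × List String) → String
  | none => "O"
  | some c => c.1

def pvInv (stA : String × List Char)
    (stB : List (String ⊕ String × List String) × Option (String × List String)) : Prop :=
  stA.1 = pvTagOf stB.2 ∧ stA.2 = pvFlat stB.1 stB.2 ∧
    (∀ c ts, stB.2 = some (c, ts) → c ≠ "O" ∧ ts ≠ [])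

lemma pvJoin_append (l : List (List Char)) (x : List Char) (h : l ≠ []) :
    PySem.Chars.join [' '] (l ++ [x]) = PySem.Chars.join [' '] l ++ ' ' :: x := by
  induction l with
  | nil => exact absurd rfl h
  | cons a l ih =>
    match l with
    | [] => simp [PySem.Chars.join_cons_cons, PySem.Chars.join_singleton]
    | b :: l' =>
      simp only [List.cons_append]
      have hih := ih (by simp)
      simp only [List.cons_append] at hih
      rw [PySem.Chars.join_cons_cons, PySem.Chars.join_cons_cons, hih]
      simp

lemma pvCats_ne_O (c : String) (h : c ∈ pvCats) : c ≠ "O" := by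
  intro e
  rw [e] at h
  exact absurd h (by decide)

lemma pvFlat_append (segs : List (String ⊕ String × List String)) (s : String ⊕ String × List String)
    (cur : Option (String × List String)) :
    pvFlat (segs ++ [s]) cur = pvFlat segs none ++ pvPieceA s ++ pvOpen cur := by
  simp [pvFlat, pvOpen]

lemma pvInv_step (stA : String × List Char)
    (stB : List (String ⊕ String × List String) × Option (String × List String))
    (p : String × String) (h : pvInv stA stB) :
    pvInv (pvStepPair stA p) (pvStepB stB p) := by
  obtain ⟨h1, h2, h3⟩ := h
  by_cases hO : p.2 = "O"
  · -- tag is 'O': B flushes any open group and emits the word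
    match hc : stB.2 with
    | none =>
      have hp : stA.1 = "O" := by rw [h1, hc]; rfl
      refine ⟨?_, ?_, ?_⟩ <;>
        simp [pvStepPair, pvStepB, hO, hp, hc, pvFlush, pvFlat, h2, pvPieceA, pvOpen,
          pvTagOf, pvRenderSeg]
    | some c =>
      have hne : stA.1 ≠ "O" := by
        rw [h1, hc]; exact (h3 c.1 c.2 (by rw [hc])).1
      refine ⟨?_, ?_, ?_⟩
      · simp [pvStepPair, pvStepB, hO, hne, hc, pvTagOf]
      · simp [pvStepPair, pvStepB, hO, hne, hc, h2, pvFlush, pvFlat, pvOpen,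
          pvPieceA, pvRenderSeg, List.append_assoc]
      · simp [pvStepB, hO]
  · by_cases hcat : pvTagCat p.2 ∈ pvCats
    · have hcne : pvTagCat p.2 ≠ "O" := pvCats_ne_O _ hcat
      have hcatb : pvCats.contains (pvTagCat p.2) = true := by simpa using hcat
      match hc : stB.2 with
      | none =>
        have hp : stA.1 = "O" := by rw [h1, hc]; rfl
        refine ⟨?_, ?_, ?_⟩
        · simp [pvStepPair, pvStepB, hO, hcat, hp, hc, pvTagOf]
        · simp [pvStepPair, pvStepB, hO, hcat, hp, hc, h2, pvFlat, pvOpen,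
            PySem.Chars.join_singleton]
        · intro c' ts' hts'
          simp [pvStepB, hO, hcat, hc] at hts'
          exact ⟨hts'.1 ▸ hcne, by simp [← hts'.2]⟩
      | some c =>
        have hAc : stA.1 = c.1 := by rw [h1, hc]; rfl
        have hcO : c.1 ≠ "O" := (h3 c.1 c.2 (by rw [hc])).1
        have hts : c.2 ≠ [] := (h3 c.1 c.2 (by rw [hc])).2
        have hpneq : stA.1 ≠ "O" := by rw [hAc]; exact hcO
        by_cases heq : c.1 = pvTagCat p.2
        · -- same category: extend the open group
          have hpe : stA.1 = pvTagCat p.2 := by rw [hAc]; exact heq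
          refine ⟨?_, ?_, ?_⟩
          · simp [pvStepPair, pvStepB, hO, hcat, hc, heq, hpe, hcne, pvTagOf]
          · simp [pvStepPair, pvStepB, hO, hcat, hc, heq, hpe, hcne, h2, pvFlat,
              pvOpen, List.append_assoc]
            rw [pvJoin_append _ _ (by simpa using hts)]
          · intro c' ts' hts'
            simp [pvStepB, hO, hcat, hc, heq] at hts'
            exact ⟨hts'.1 ▸ hcne, by simp [← hts'.2]⟩
        · -- different category: close the group, open a new one
          have hne2 : stA.1 ≠ pvTagCat p.2 := by rw [hAc]; exact heq
          refine ⟨?_, ?_, ?_⟩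
          · simp [pvStepPair, pvStepB, hO, hcat, hc, heq, hpneq, hne2, pvTagOf]
          · simp [pvStepPair, pvStepB, hO, hcat, hc, heq, hpneq, hne2, h2, pvFlat,
              pvOpen, pvPieceA, pvRenderSeg, PySem.Chars.join_singleton, List.append_assoc]
          · intro c' ts' hts'
            simp [pvStepB, hO, hcat, hc, heq] at hts'
            exact ⟨hts'.1 ▸ hcne, by simp [← hts'.2]⟩
    · -- category not recognised: both sides skip
      have hcatb : pvCats.contains (pvTagCat p.2) = false := by
        simpa using hcat
      have hA : pvStepPair stA p = stA := by simp [pvStepPair, hO, hcat]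
      have hB : pvStepB stB p = stB := by simp [pvStepB, hO, hcat]
      rw [hA, hB]; exact ⟨h1, h2, h3⟩

lemma pvInv_foldl (L : List (String × String)) :
    ∀ stA stB, pvInv stA stB → pvInv (L.foldl pvStepPair stA) (L.foldl pvStepB stB) := by
  induction L with
  | nil => intro stA stB h; exact h
  | cons p L ih =>
    intro stA stB h
    exact ih _ _ (pvInv_step stA stB p h)

lemma pvStrip_cons_space (s : List Char) : PySem.Chars.strip (' ' :: s) = PySem.Chars.strip s := by
  simp [PySem.Chars.strip, PySem.Chars.lstrip, PySem.Chars.isspace]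

lemma pvFlat_none_eq (segs : List (String ⊕ String × List String)) (h : segs ≠ []) :
    pvFlat segs none = ' ' :: PySem.Chars.join [' '] (segs.map pvRenderSeg) := by
  induction segs with
  | nil => exact absurd rfl h
  | cons a l ih =>
    match l with
    | [] => simp [pvFlat, pvPieceA, pvOpen, PySem.Chars.join_singleton]
    | b :: l' =>
      simp only [List.map_cons, PySem.Chars.join_cons_cons]
      have := ih (by simp)
      simp only [pvFlat, List.map_cons, List.flatten_cons, pvOpen, List.append_nil] at this ⊢
      rw [this]
      simp [pvPieceA]

lemma pvStrip_flat (segs : List (String ⊕ String × List String)) :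
    PySem.Chars.strip (pvFlat segs none)
      = PySem.Chars.strip (PySem.Chars.join [' '] (segs.map pvRenderSeg)) := by
  match segs with
  | [] => simp [pvFlat, pvOpen, PySem.Chars.join_nil]
  | a :: l => rw [pvFlat_none_eq _ (by simp), pvStrip_cons_space]

lemma pvFinal (stA : String × List Char)
    (stB : List (String ⊕ String × List String) × Option (String × List String))
    (h : pvInv stA stB) :
    PySem.Chars.strip (if stA.1 = "O" then stA.2 else stA.2 ++ [']'])
      = PySem.Chars.strip (PySem.Chars.join [' '] ((pvFlush stB.1 stB.2).map pvRenderSeg)) := by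
  obtain ⟨h1, h2, h3⟩ := h
  match hc : stB.2 with
  | none =>
    have hp : stA.1 = "O" := by rw [h1, hc]; rfl
    rw [if_pos hp, h2, hc]
    show PySem.Chars.strip (pvFlat stB.1 none) = _
    rw [pvStrip_flat]
    simp [pvFlush]
  | some c =>
    have hne : stA.1 ≠ "O" := by rw [h1, hc]; exact (h3 c.1 c.2 (by rw [hc])).1
    rw [if_neg hne, h2, hc]
    have e : pvFlat stB.1 (some c) ++ [']'] = pvFlat (stB.1 ++ [Sum.inr c]) none := by
      rw [pvFlat_append]
      simp [pvFlat, pvPieceA, pvRenderSeg, pvOpen, List.append_assoc]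
    rw [e, pvStrip_flat]
    simp [pvFlush]

-- ===== VERDICT (by name: the statement is the Claim_ definition above) =====
theorem stringify_labeled_doc_spec : Claim_equal_stringify_labeled_doc := by
  intro text ner _ hpre
  show stringify_labeled_doc text ner = stringify_labeled_doc_alt text ner
  have hzip := pvFoldA_eq_zip text ner ("O", []) hpre.1
  have hinv : pvInv ((text.zip ner).foldl pvStepPair ("O", []))
      ((text.zip ner).foldl pvStepB ([], none)) :=
    pvInv_foldl (text.zip ner) _ _ ⟨rfl, by simp [pvFlat, pvOpen], by simp⟩
  simp only [stringify_labeled_doc, stringify_labeled_doc_alt, ne_eq, ite_not]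
  rw [hzip]
  exact congrArg String.ofList (pvFinal _ _ hinv)
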